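-- pv_equiv track=rewrite | github.com/Ambuj-UF/ConCat-1.0 | src/Coevolver/__init__.py | _matchy_pdb
-- ===== SOURCE A (Python) =====
-- def _matchy_pdb(pdb_keys, rangeVal):
--     pre_val = pdb_keys[0] - 1
--     ranger = list()
--     diff = 0
--     for val1, val2 in zip(pdb_keys, rangeVal):
--         if val1 - pre_val == 1:
--             ranger.append(val2+diff)
--             pre_val = val1
--         else:
--             diff = diff + val1 - pre_val - 1
--             pre_val = val1
--
--     return ranger
-- ===== SOURCE B (Python) =====
-- def _matchy_pdb(pdb_keys, rangeVal):
--     # Stateless re-derivation: the running `diff` of the original telescopes to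
--     # pdb_keys[i-1] - pdb_keys[0] - (i-1), so each kept value is computed directly
--     # from indices instead of carrying (pre_val, diff) state through the loop.
--     ranger = []
--     for i, (k, v) in enumerate(zip(pdb_keys, rangeVal)):
--         if i == 0:
--             ranger.append(v)
--         elif k - pdb_keys[i - 1] == 1:
--             ranger.append(v + pdb_keys[i - 1] - pdb_keys[0] - (i - 1))
--     return ranger
-- ===== Notes on version B (the rewrite author's own statement) =====
-- stated objective: alternative
-- what changed: Replaces the stateful (pre_val, diff) accumulator with a closed-form offset pdb_keys[i-1]-pdb_keys[0]-(i-1) obtained by telescoping the diff updates, computed per index with no carried state.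
import Mathlib
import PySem

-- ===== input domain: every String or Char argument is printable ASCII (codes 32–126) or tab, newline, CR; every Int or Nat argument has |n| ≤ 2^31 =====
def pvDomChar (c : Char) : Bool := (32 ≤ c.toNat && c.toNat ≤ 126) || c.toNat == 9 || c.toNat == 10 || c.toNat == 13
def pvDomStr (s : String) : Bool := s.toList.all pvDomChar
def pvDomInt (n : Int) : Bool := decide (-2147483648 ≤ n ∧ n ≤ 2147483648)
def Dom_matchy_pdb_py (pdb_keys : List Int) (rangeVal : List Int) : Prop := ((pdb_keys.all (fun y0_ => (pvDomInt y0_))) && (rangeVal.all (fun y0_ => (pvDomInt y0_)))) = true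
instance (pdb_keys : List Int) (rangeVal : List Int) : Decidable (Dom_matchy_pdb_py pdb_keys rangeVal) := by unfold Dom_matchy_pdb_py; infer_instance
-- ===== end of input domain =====

-- B replaces A's stateful (pre_val, diff) accumulator with a per-index closed-form offset (objective: alternative).

-- ===== PORT A =====
-- state = (pre_val, diff, ranger)
def pvAStep (st : Int × Int × List Int) (p : Int × Int) : Int × Int × List Int :=
  if p.1 - st.1 = 1 then (p.1, st.2.1, st.2.2 ++ [p.2 + st.2.1])
  else (p.1, st.2.1 + p.1 - st.1 - 1, st.2.2)

def matchy_pdb_py (pdb_keys : List Int) (rangeVal : List Int) : List Int :=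
  match pdb_keys with
  | [] => []  -- pdb_keys[0] raises IndexError here; excluded by Pre_
  | k0 :: _ => ((pdb_keys.zip rangeVal).foldl pvAStep (k0 - 1, 0, [])).2.2

-- ===== PORT B =====
-- the pdb_keys[i-1] / pdb_keys[0] lookups are always in range inside the loop, so pyGetD is exact
def pvBStep (pdb_keys : List Int) (out : List Int) (p : Int × (Int × Int)) : List Int :=
  if p.1 = 0 then out ++ [p.2.2]
  else if p.2.1 - PySem.List.pyGetD pdb_keys (p.1 - 1) 0 = 1 then
    out ++ [p.2.2 + PySem.List.pyGetD pdb_keys (p.1 - 1) 0 - PySem.List.pyGetD pdb_keys 0 0 - (p.1 - 1)]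
  else out

def matchy_pdb_py_alt (pdb_keys : List Int) (rangeVal : List Int) : List Int :=
  (PySem.List.enumerate (pdb_keys.zip rangeVal) 0).foldl (pvBStep pdb_keys) []

-- ===== PRECONDITION & SPEC =====
-- Pre_ excludes only empty pdb_keys, on which A raises IndexError at pdb_keys[0]
def Pre_matchy_pdb_py (pdb_keys : List Int) (rangeVal : List Int) : Prop := pdb_keys ≠ []
instance (pdb_keys : List Int) (rangeVal : List Int) : Decidable (Pre_matchy_pdb_py pdb_keys rangeVal) := by unfold Pre_matchy_pdb_py; infer_instance
def pvWitness_matchy_pdb_py : List Int × List Int := ([3, 4, 7, 8], [10, 20, 30, 40])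

def Spec_matchy_pdb_py (pdb_keys : List Int) (rangeVal : List Int) (out : List Int) : Prop := out = matchy_pdb_py_alt pdb_keys rangeVal
instance (pdb_keys : List Int) (rangeVal : List Int) (out : List Int) : Decidable (Spec_matchy_pdb_py pdb_keys rangeVal out) := by unfold Spec_matchy_pdb_py; infer_instance

-- ===== CLAIM (what is proved, stated in full; the proofs are below) =====
def Claim_equal_matchy_pdb_py : Prop := ∀ (pdb_keys : List Int) (rangeVal : List Int), Dom_matchy_pdb_py pdb_keys rangeVal → Pre_matchy_pdb_py pdb_keys rangeVal → Spec_matchy_pdb_py pdb_keys rangeVal (matchy_pdb_py pdb_keys rangeVal)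

-- ===== LEMMAS AND PROOFS =====

-- loop invariant: B's enumerated fold from index i equals A's fold when pre/diff carry their closed forms
theorem pvLoop (pdb_keys rangeVal : List Int) (t : List (Int × Int)) :
    ∀ (i : Nat) (pre diff : Int) (acc : List Int),
      (pdb_keys.zip rangeVal).drop i = t →
      1 ≤ i →
      pre = pdb_keys.getD (i - 1) 0 →
      diff = pre - pdb_keys.getD 0 0 - ((i : Int) - 1) →
      (PySem.List.enumerate t (i : Int)).foldl (pvBStep pdb_keys) acc
        = (t.foldl pvAStep (pre, diff, acc)).2.2 := by
  induction t with
  | nil => intro i pre diff acc _ _ _ _; simp [PySem.List.enumerate]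
  | cons p t' ih =>
    intro i pre diff acc hdrop hi hpre hdiff
    obtain ⟨k, v⟩ := p
    have hz : (pdb_keys.zip rangeVal)[i]? = some (k, v) := by
      have : ((pdb_keys.zip rangeVal).drop i)[0]? = some (k, v) := by rw [hdrop]; rfl
      simpa using this
    have hilt : i < (pdb_keys.zip rangeVal).length := by
      by_contra h
      rw [List.getElem?_eq_none (by omega)] at hz
      simp at hz
    have hik : i < pdb_keys.length := by
      have := List.length_zip (l₁ := pdb_keys) (l₂ := rangeVal)
      omega
    obtain ⟨h1, _⟩ := List.getElem?_zip_eq_some.mp hz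
    have hk : pdb_keys[i] = k := by
      simpa [List.getElem?_eq_getElem hik] using h1
    have hcast : (i : Int) - 1 = ((i - 1 : Nat) : Int) := by omega
    have hget : PySem.List.pyGetD pdb_keys ((i : Int) - 1) 0 = pre := by
      rw [hcast, PySem.List.pyGetD_natCast]; exact hpre.symm
    have hget0 : PySem.List.pyGetD pdb_keys 0 0 = pdb_keys.getD 0 0 := by
      have : (0 : Int) = ((0 : Nat) : Int) := rfl
      rw [this, PySem.List.pyGetD_natCast]
    have hdrop' : (pdb_keys.zip rangeVal).drop (i + 1) = t' := by
      have : (pdb_keys.zip rangeVal).drop (i + 1) = ((pdb_keys.zip rangeVal).drop i).tail := by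
        rw [List.drop_add_one_eq_tail_drop]
      rw [this, hdrop]; rfl
    have hpre' : k = pdb_keys.getD (i + 1 - 1) 0 := by
      simp [List.getD, List.getElem?_eq_getElem hik, hk]
    have hine : (i : Int) ≠ 0 := by omega
    have hi0 : ¬ i = 0 := by omega
    rw [PySem.List.enumerate_cons]
    by_cases hc : k - pre = 1
    · have : pvBStep pdb_keys acc ((i : Int), (k, v)) = acc ++ [v + diff] := by
        simp [pvBStep, hi0, hget, hget0, hc, hdiff]
        ring
      rw [List.foldl_cons, this]
      have hA : pvAStep (pre, diff, acc) (k, v) = (k, diff, acc ++ [v + diff]) := by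
        simp [pvAStep, hc]
      rw [List.foldl_cons, hA]
      have : (i : Int) + 1 = ((i + 1 : Nat) : Int) := by omega
      rw [this]
      apply ih (i + 1) k diff (acc ++ [v + diff]) hdrop' (by omega) hpre'
      rw [hdiff]
      have : pre = k - 1 := by omega
      rw [this]; push_cast; ring
    · have : pvBStep pdb_keys acc ((i : Int), (k, v)) = acc := by
        simp [pvBStep, hi0, hget, hc]
      rw [List.foldl_cons, this]
      have hA : pvAStep (pre, diff, acc) (k, v) = (k, diff + k - pre - 1, acc) := by
        simp [pvAStep, hc]
      rw [List.foldl_cons, hA]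
      have : (i : Int) + 1 = ((i + 1 : Nat) : Int) := by omega
      rw [this]
      apply ih (i + 1) k (diff + k - pre - 1) acc hdrop' (by omega) hpre'
      rw [hdiff]; push_cast; ring

-- ===== VERDICT (by name: the statement is the Claim_ definition above) =====
theorem matchy_pdb_py_spec : Claim_equal_matchy_pdb_py := by
  intro pdb_keys rangeVal _ hpre
  unfold Spec_matchy_pdb_py
  match pdb_keys, hpre with
  | k0 :: ks, _ =>
    cases rangeVal with
    | nil => rfl
    | cons v0 vs =>
      show ((((k0 :: ks).zip (v0 :: vs)).foldl pvAStep (k0 - 1, 0, [])).2.2 : List Int)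
        = matchy_pdb_py_alt (k0 :: ks) (v0 :: vs)
      unfold matchy_pdb_py_alt
      have hzip : (k0 :: ks).zip (v0 :: vs) = (k0, v0) :: ks.zip vs := rfl
      rw [hzip, PySem.List.enumerate_cons, List.foldl_cons, List.foldl_cons]
      have hB0 : pvBStep (k0 :: ks) [] ((0 : Int), (k0, v0)) = [v0] := by
        simp [pvBStep]
      have hA0 : pvAStep (k0 - 1, 0, []) (k0, v0) = (k0, 0, [v0]) := by
        simp [pvAStep, show k0 - (k0 - 1) = 1 by ring]
      rw [hB0, hA0]
      have hone : (0 : Int) + 1 = ((1 : Nat) : Int) := by norm_num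
      rw [hone]
      have hdrop : ((k0 :: ks).zip (v0 :: vs)).drop 1 = ks.zip vs := rfl
      exact (pvLoop (k0 :: ks) (v0 :: vs) (ks.zip vs) 1 k0 0 [v0] hdrop (by omega)
        (by simp) (by simp)).symm
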